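-- pv_equiv track=rewrite | github.com/Kai124816/Class-Encore-Winter-26 | week_6/solutions.py | contains_peak
-- ===== SOURCE A (Python) =====
-- def contains_peak(nums: list[int]) -> bool:
--     """
--     Determine if a list contains at least one 'peak'.
--
--     A peak is an element greater than its immediate neighbors.
--     Boundaries only need to be greater than their single neighbor.
--
--     Args:
--         nums: A list of integers.
--
--     Returns:
--         True if at least one peak exists, False otherwise.
--
--     >>> contains_peak([1, 2, 3, 2, 1])
--     True
--     >>> contains_peak([1, 2, 3])
--     True
--     >>> contains_peak([5, 4, 3])
--     True
--     >>> contains_peak([])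
--     False
--     """
--     length = len(nums)
--     if length == 0:
--         return False
--     if length == 1:
--         return True
--
--     for i in range(length):
--         if i == 0 and nums[i] > nums[1]:
--             return True
--         if i == (length - 1) and nums[i] > nums[i - 1]:
--             return True
--         if nums[i] > nums[i - 1] and nums[i] > nums[i + 1]:
--             return True
--     return False
-- ===== SOURCE B (Python) =====
-- def contains_peak(nums: list[int]) -> bool:
--     if not nums:
--         return False
--     # Pad the consecutive-difference sign table with virtual -infinity sentinels
--     # (an up-step before the first element, a down-step after the last): a peak
--     # anywhere -- interior or boundary -- is exactly an up-step immediately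
--     # followed by a down-step in the padded table.
--     signs = [1] + [(b > a) - (b < a) for a, b in zip(nums, nums[1:])] + [-1]
--     return any(p > 0 and c < 0 for p, c in zip(signs, signs[1:]))
-- ===== Notes on version B (the rewrite author's own statement) =====
-- stated objective: alternative
-- what changed: B builds the consecutive-difference sign table padded with virtual -infinity sentinels (an up-step before the first element, a down-step after the last) and reduces the whole problem -- interior peaks, both boundary cases and the single-element case alike -- to one scan of that table for an adjacent up-then-down pair; A instead index-loops over the list with three per-index branch tests and wraparound index arithmetic.
import Mathlib
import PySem

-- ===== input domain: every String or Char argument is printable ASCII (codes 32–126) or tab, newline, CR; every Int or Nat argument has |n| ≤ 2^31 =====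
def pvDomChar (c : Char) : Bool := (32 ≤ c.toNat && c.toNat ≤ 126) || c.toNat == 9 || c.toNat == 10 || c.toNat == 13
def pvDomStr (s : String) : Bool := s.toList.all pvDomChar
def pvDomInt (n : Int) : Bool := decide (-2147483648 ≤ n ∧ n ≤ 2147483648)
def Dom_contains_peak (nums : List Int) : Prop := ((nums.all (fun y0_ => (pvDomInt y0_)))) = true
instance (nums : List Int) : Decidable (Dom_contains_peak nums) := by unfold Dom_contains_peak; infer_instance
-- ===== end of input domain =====

-- B replaces A's index loop (three per-index branch tests with wraparound indices) by a
-- difference-sign table padded with virtual -infinity sentinels, scanned once for an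
-- adjacent up-then-down sign pair; objective: alternative decomposition, same cost.


-- ===== PORT A =====
-- nums[i] > nums[j] on Option values: false where Python would raise IndexError
-- (in A the none case is reached only where Python's `and` has already short-circuited).
def pyGtOpt : Option Int → Option Int → Bool
  | some x, some y => decide (y < x)
  | _, _ => false

-- the `for i in range(length)` loop of A, over the remaining index list
def aLoop (nums : List Int) (length : Int) : List Int → Bool
  | [] => false
  | i :: rest =>
    if i == 0 && pyGtOpt (PySem.List.pyGet? nums i) (PySem.List.pyGet? nums 1) then true
    else if i == length - 1 && pyGtOpt (PySem.List.pyGet? nums i) (PySem.List.pyGet? nums (i-1)) then true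
    else if pyGtOpt (PySem.List.pyGet? nums i) (PySem.List.pyGet? nums (i-1))
            && pyGtOpt (PySem.List.pyGet? nums i) (PySem.List.pyGet? nums (i+1)) then true
    else aLoop nums length rest

def contains_peak (nums : List Int) : Bool :=
  let length : Int := nums.length
  if length == 0 then false
  else if length == 1 then true
  else aLoop nums length (PySem.List.pyRange 0 length 1)

-- ===== PORT B =====
-- Python's (b > a) - (b < a): the sign of the difference b - a
def pySign (a b : Int) : Int :=
  (if a < b then (1 : Int) else 0) - (if b < a then (1 : Int) else 0)

def contains_peak_alt (nums : List Int) : Bool :=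
  if nums.isEmpty then false
  else
    let signs : List Int :=
      [1] ++ (nums.zip (PySem.List.slice nums (some 1) none)).map (fun p => pySign p.1 p.2) ++ [-1]
    (signs.zip (PySem.List.slice signs (some 1) none)).any
      (fun p => decide (0 < p.1) && decide (p.2 < 0))

-- ===== PRECONDITION & SPEC =====
def Spec_contains_peak (nums : List Int) (out : Bool) : Prop := out = contains_peak_alt nums
instance (nums : List Int) (out : Bool) : Decidable (Spec_contains_peak nums out) := by unfold Spec_contains_peak; infer_instance

-- ===== CLAIM (what is proved, stated in full; the proofs are below) =====
def Claim_equal_contains_peak : Prop := ∀ (nums : List Int), Dom_contains_peak nums → Spec_contains_peak nums (contains_peak nums)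

-- ===== LEMMAS AND PROOFS =====

-- the loop returns true iff some remaining index satisfies one of the three branch tests
lemma aLoop_eq_any (nums : List Int) (L : Int) (idxs : List Int) :
    aLoop nums L idxs = idxs.any (fun i =>
      (i == 0 && pyGtOpt (PySem.List.pyGet? nums i) (PySem.List.pyGet? nums 1))
      || (i == L - 1 && pyGtOpt (PySem.List.pyGet? nums i) (PySem.List.pyGet? nums (i-1)))
      || (pyGtOpt (PySem.List.pyGet? nums i) (PySem.List.pyGet? nums (i-1))
          && pyGtOpt (PySem.List.pyGet? nums i) (PySem.List.pyGet? nums (i+1)))) := by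
  induction idxs with
  | nil => rfl
  | cons i rest ih =>
    simp only [aLoop, List.any_cons, ← ih]
    cases i == 0 && pyGtOpt (PySem.List.pyGet? nums i) (PySem.List.pyGet? nums 1) <;>
      cases i == L - 1 && pyGtOpt (PySem.List.pyGet? nums i) (PySem.List.pyGet? nums (i-1)) <;>
      cases pyGtOpt (PySem.List.pyGet? nums i) (PySem.List.pyGet? nums (i-1))
            && pyGtOpt (PySem.List.pyGet? nums i) (PySem.List.pyGet? nums (i+1)) <;>
      simp

-- common characterisation: a peak exists (n ≥ 2 case), phrased over Nat indices with getD
def PeakProp (nums : List Int) : Prop :=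
  nums.getD 1 0 < nums.getD 0 0
  ∨ nums.getD (nums.length - 2) 0 < nums.getD (nums.length - 1) 0
  ∨ ∃ j, j + 2 < nums.length ∧ nums.getD j 0 < nums.getD (j+1) 0 ∧ nums.getD (j+2) 0 < nums.getD (j+1) 0

lemma pyGet?_getD (nums : List Int) (k : Nat) (h : k < nums.length) :
    PySem.List.pyGet? nums (k : Int) = some (nums.getD k 0) := by
  rw [PySem.List.pyGet?_natCast, List.getElem?_eq_getElem h, List.getD_eq_getElem _ _ h]

lemma pySign_pos_iff (a b : Int) : 0 < pySign a b ↔ a < b := by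
  unfold pySign; split_ifs <;> omega

lemma pySign_neg_iff (a b : Int) : pySign a b < 0 ↔ b < a := by
  unfold pySign; split_ifs <;> omega

lemma A_true_iff (nums : List Int) (h2 : 2 ≤ nums.length) :
    contains_peak nums = true ↔ PeakProp nums := by
  have e0 := pyGet?_getD nums 0 (by omega)
  have e1 := pyGet?_getD nums 1 (by omega)
  push_cast at e0 e1
  simp only [contains_peak]
  rw [if_neg (by simp only [beq_iff_eq]; omega), if_neg (by simp only [beq_iff_eq]; omega), aLoop_eq_any]
  rw [List.any_eq_true]
  constructor
  · rintro ⟨i, hmem, hc⟩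
    rw [PySem.List.mem_pyRange_one] at hmem
    obtain ⟨h0, hlt⟩ := hmem
    lift i to ℕ using h0 with k
    have hk : k < nums.length := by exact_mod_cast hlt
    simp only [Bool.or_eq_true, Bool.and_eq_true, beq_iff_eq] at hc
    rcases hc with (⟨hk0, hgt⟩ | ⟨hklast, hgt⟩) | ⟨hgt1, hgt2⟩
    · -- first branch fires only at i = 0
      rw [hk0, e0, e1] at hgt
      simp only [pyGtOpt, decide_eq_true_eq] at hgt
      exact Or.inl hgt
    · -- second branch fires only at i = length - 1
      have hk' : k = nums.length - 1 := by omega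
      have hcast : (k : Int) - 1 = ((nums.length - 2 : Nat) : Int) := by omega
      rw [hcast, pyGet?_getD nums (nums.length - 2) (by omega),
          pyGet?_getD nums k hk, hk'] at hgt
      simp only [pyGtOpt, decide_eq_true_eq] at hgt
      exact Or.inr (Or.inl hgt)
    · -- third branch: split on the position of k
      by_cases hk0 : k = 0
      · subst hk0
        norm_num at hgt2
        rw [e0, e1] at hgt2
        simp only [pyGtOpt, decide_eq_true_eq] at hgt2
        exact Or.inl hgt2
      · by_cases hklast : k = nums.length - 1
        · -- nums[i+1] is out of range there; Python short-circuits, the port returns false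
          have : PySem.List.pyGet? nums ((k : Int) + 1) = none := by
            rw [show ((k:Int) + 1) = ((nums.length : Nat) : Int) by omega,
                PySem.List.pyGet?_natCast, List.getElem?_eq_none (by omega)]
          rw [this] at hgt2
          simp [pyGtOpt] at hgt2
        · refine Or.inr (Or.inr ⟨k - 1, by omega, ?_, ?_⟩)
          · rw [show ((k:Int) - 1) = ((k - 1 : Nat) : Int) by omega,
                pyGet?_getD nums (k-1) (by omega), pyGet?_getD nums k hk] at hgt1
            simp only [pyGtOpt, decide_eq_true_eq] at hgt1
            rw [show k - 1 + 1 = k by omega]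
            exact hgt1
          · rw [show ((k:Int) + 1) = ((k + 1 : Nat) : Int) by omega,
                pyGet?_getD nums (k+1) (by omega), pyGet?_getD nums k hk] at hgt2
            simp only [pyGtOpt, decide_eq_true_eq] at hgt2
            rw [show k - 1 + 1 = k by omega, show k - 1 + 2 = k + 1 by omega]
            exact hgt2
  · rintro (hpk | hpk | ⟨j, hj, hlt1, hlt2⟩)
    · refine ⟨0, ?_, ?_⟩
      · rw [PySem.List.mem_pyRange_one]; omega
      · simp only [Bool.or_eq_true, Bool.and_eq_true, beq_iff_eq]
        exact Or.inl (Or.inl ⟨by norm_num, by rw [e0, e1]; simpa [pyGtOpt] using hpk⟩)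
    · refine ⟨((nums.length - 1 : Nat) : Int), ?_, ?_⟩
      · rw [PySem.List.mem_pyRange_one]; omega
      · simp only [Bool.or_eq_true, Bool.and_eq_true, beq_iff_eq]
        refine Or.inl (Or.inr ⟨by omega, ?_⟩)
        rw [show (((nums.length - 1 : Nat) : Int) - 1) = ((nums.length - 2 : Nat) : Int) by omega,
            pyGet?_getD nums (nums.length - 1) (by omega), pyGet?_getD nums (nums.length - 2) (by omega)]
        simpa [pyGtOpt] using hpk
    · refine ⟨((j + 1 : Nat) : Int), ?_, ?_⟩
      · rw [PySem.List.mem_pyRange_one]; omega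
      · simp only [Bool.or_eq_true, Bool.and_eq_true, beq_iff_eq]
        refine Or.inr ⟨?_, ?_⟩
        · rw [show (((j + 1 : Nat) : Int) - 1) = ((j : Nat) : Int) by omega,
              pyGet?_getD nums j (by omega), pyGet?_getD nums (j+1) (by omega)]
          simpa [pyGtOpt] using hlt1
        · rw [show (((j + 1 : Nat) : Int) + 1) = ((j + 2 : Nat) : Int) by omega,
              pyGet?_getD nums (j+2) (by omega), pyGet?_getD nums (j+1) (by omega)]
          simpa [pyGtOpt] using hlt2

-- the padded sign table, read at position j (getElem? form)
lemma signs_get? (nums : List Int) (h2 : 2 ≤ nums.length) (j : Nat)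
    (hj : j < nums.length + 1) :
    ([(1 : Int)] ++ (nums.zip nums.tail).map (fun p => pySign p.1 p.2) ++ [-1])[j]? =
    some (if j = 0 then 1 else if j = nums.length then -1
          else pySign (nums.getD (j-1) 0) (nums.getD j 0)) := by
  have hzlen : ((nums.zip nums.tail).map (fun p => pySign p.1 p.2)).length = nums.length - 1 := by
    simp [List.length_zip, List.length_tail]
  have hz2 : (nums.zip nums.tail).length = nums.length - 1 := by
    simp [List.length_zip, List.length_tail]
  match j with
  | 0 => simp
  | Nat.succ k =>
    simp only [List.cons_append, List.nil_append]
    rw [show k.succ = k + 1 from rfl, List.getElem?_cons_succ]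
    by_cases hk : k < nums.length - 1
    · rw [List.getElem?_append_left (by omega), List.getElem?_map,
          List.getElem?_eq_getElem (by omega), List.getElem_zip, List.getElem_tail]
      rw [if_neg (by omega), if_neg (by omega)]
      rw [List.getD_eq_getElem _ _ (by omega), List.getD_eq_getElem _ _ (by omega)]
      simp
    · rw [List.getElem?_append_right (by omega)]
      rw [if_neg (by omega), if_pos (by omega)]
      rw [hzlen, show k - (nums.length - 1) = 0 by omega]
      simp

-- the same fact for total indexing
lemma signs_getElem (nums : List Int) (h2 : 2 ≤ nums.length) (j : Nat)
    (hj : j < nums.length + 1) :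
    ([(1 : Int)] ++ (nums.zip nums.tail).map (fun p => pySign p.1 p.2) ++ [-1])[j]'(by
      simp [List.length_zip, List.length_tail]; omega) =
    if j = 0 then 1 else if j = nums.length then -1
    else pySign (nums.getD (j-1) 0) (nums.getD j 0) := by
  have h := signs_get? nums h2 j hj
  rw [List.getElem?_eq_getElem (by simp [List.length_zip, List.length_tail]; omega)] at h
  exact Option.some.inj h

lemma B_true_iff (nums : List Int) (h2 : 2 ≤ nums.length) :
    contains_peak_alt nums = true ↔ PeakProp nums := by
  have hne : nums.isEmpty = false := by
    cases nums with
    | nil => simp at h2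
    | cons a t => rfl
  simp only [contains_peak_alt, hne, Bool.false_eq_true, if_false]
  have hs1 : PySem.List.slice nums (some 1) none = nums.tail := by simp [pysem]
  rw [hs1]
  set S : List Int := [(1 : Int)] ++ (nums.zip nums.tail).map (fun p => pySign p.1 p.2) ++ [-1] with hS
  have hSlen : S.length = nums.length + 1 := by
    simp [hS, List.length_zip, List.length_tail]; omega
  have hst : PySem.List.slice S (some 1) none = S.tail := by simp [pysem]
  rw [hst, List.any_eq_true]
  have hplen : (S.zip S.tail).length = nums.length := by
    simp [List.length_zip, List.length_tail, hSlen]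
  have hget : ∀ j (hj : j < (S.zip S.tail).length),
      (S.zip S.tail)[j] = (S[j]'(by omega), S[j+1]'(by omega)) := by
    intro j hj
    rw [List.getElem_zip, List.getElem_tail]
  constructor
  · rintro ⟨t, ht, hp⟩
    rw [List.mem_iff_getElem] at ht
    obtain ⟨j, hj, htj⟩ := ht
    rw [hget j hj] at htj
    subst htj
    simp only [Bool.and_eq_true, decide_eq_true_eq] at hp
    obtain ⟨hp1, hp2⟩ := hp
    have hjn : j < nums.length := by omega
    rw [signs_getElem nums h2 j (by omega)] at hp1
    rw [signs_getElem nums h2 (j+1) (by omega)] at hp2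
    by_cases hj0 : j = 0
    · subst hj0
      rw [if_neg (by omega), if_neg (by omega)] at hp2
      rw [pySign_neg_iff] at hp2
      exact Or.inl hp2
    · by_cases hjl : j = nums.length - 1
      · rw [if_neg hj0, if_neg (by omega), pySign_pos_iff] at hp1
        refine Or.inr (Or.inl ?_)
        rw [show nums.length - 2 = j - 1 by omega, show nums.length - 1 = j by omega]
        exact hp1
      · rw [if_neg hj0, if_neg (by omega), pySign_pos_iff] at hp1
        rw [if_neg (by omega), if_neg (by omega), pySign_neg_iff] at hp2
        refine Or.inr (Or.inr ⟨j - 1, by omega, ?_, ?_⟩)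
        · rw [show j - 1 + 1 = j by omega]; exact hp1
        · rw [show j - 1 + 1 = j by omega, show j - 1 + 2 = j + 1 by omega]
          simpa using hp2
  · have mk : ∀ j (hj : j < nums.length), (0 < S[j]'(by omega)) → (S[j+1]'(by omega) < 0) →
        ∃ t ∈ S.zip S.tail, (decide (0 < t.1) && decide (t.2 < 0)) = true := by
      intro j hj h1 h2'
      refine ⟨(S.zip S.tail)[j]'(by omega), List.getElem_mem _, ?_⟩
      rw [hget j (by omega)]
      simp only [Bool.and_eq_true, decide_eq_true_eq]
      exact ⟨h1, h2'⟩
    rintro (hpk | hpk | ⟨j, hj, hlt1, hlt2⟩)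
    · refine mk 0 (by omega) ?_ ?_
      · rw [signs_getElem nums h2 0 (by omega)]; norm_num
      · rw [signs_getElem nums h2 1 (by omega), if_neg (by omega), if_neg (by omega),
            pySign_neg_iff]
        simpa using hpk
    · refine mk (nums.length - 1) (by omega) ?_ ?_
      · rw [signs_getElem nums h2 (nums.length - 1) (by omega), if_neg (by omega),
            if_neg (by omega), pySign_pos_iff]
        rw [show nums.length - 1 - 1 = nums.length - 2 by omega]
        exact hpk
      · simp only [show nums.length - 1 + 1 = nums.length by omega]
        rw [signs_getElem nums h2 nums.length (by omega), if_neg (by omega), if_pos rfl]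
        norm_num
    · refine mk (j + 1) (by omega) ?_ ?_
      · rw [signs_getElem nums h2 (j+1) (by omega), if_neg (by omega), if_neg (by omega),
            pySign_pos_iff]
        simpa using hlt1
      · rw [signs_getElem nums h2 (j+2) (by omega), if_neg (by omega), if_neg (by omega),
            pySign_neg_iff]
        simpa using hlt2

lemma main_eq (nums : List Int) : contains_peak nums = contains_peak_alt nums := by
  match hn : nums with
  | [] => rfl
  | [x] => rfl
  | x :: y :: rest =>
    have h2 : 2 ≤ (x :: y :: rest).length := by simp
    rw [Bool.eq_iff_iff, A_true_iff _ h2, B_true_iff _ h2]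

-- ===== VERDICT (by name: the statement is the Claim_ definition above) =====
theorem contains_peak_spec : Claim_equal_contains_peak := by
  intro nums _
  unfold Spec_contains_peak
  exact main_eq nums
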